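-- pv_equiv track=rewrite | github.com/yaneurao/Pytra | test/fixtures/nim/01_basics.py | loop_test
-- ===== SOURCE A (Python) =====
-- def loop_test(n: int) -> int:
--     res = 0
--     for i in range(n):
--         if i % 2 == 0:
--             res += i
--         else:
--             res -= 1
--     return res
-- ===== SOURCE B (Python) =====
-- def loop_test(n: int) -> int:
--     # Closed form: sum of even i in [0,n) minus the number of odd i in [0,n).
--     if n <= 0:
--         return 0
--     e = (n + 1) // 2          # how many even i in range(n)
--     return e * (e - 1) - n // 2
-- ===== Notes on version B (the rewrite author's own statement) =====
-- stated objective: faster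
-- what changed: Replaced the O(n) accumulation loop with a closed-form arithmetic expression (sum of evens below n minus the count of odds below n).
import Mathlib
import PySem

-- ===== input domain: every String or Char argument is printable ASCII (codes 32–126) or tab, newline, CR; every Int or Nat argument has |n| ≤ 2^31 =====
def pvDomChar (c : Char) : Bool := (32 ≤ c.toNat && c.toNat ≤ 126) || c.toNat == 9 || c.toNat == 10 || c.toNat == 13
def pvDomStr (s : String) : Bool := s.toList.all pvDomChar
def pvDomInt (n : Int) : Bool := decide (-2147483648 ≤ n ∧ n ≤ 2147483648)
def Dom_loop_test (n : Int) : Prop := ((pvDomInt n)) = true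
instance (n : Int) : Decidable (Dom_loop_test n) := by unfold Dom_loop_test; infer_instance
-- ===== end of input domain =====

-- B replaces A's O(n) accumulation loop by a closed-form O(1) arithmetic expression.


-- ===== PORT A =====
def loop_test (n : Int) : Int :=
  (PySem.List.pyRange 0 n 1).foldl
    (fun res i => if PySem.Int.mod i 2 = 0 then res + i else res - 1) 0

-- ===== PORT B =====
def loop_test_alt (n : Int) : Int :=
  if n ≤ 0 then 0
  else
    let e := PySem.Int.floordiv (n + 1) 2
    e * (e - 1) - PySem.Int.floordiv n 2

-- ===== PRECONDITION & SPEC =====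
def Spec_loop_test (n : Int) (out : Int) : Prop := out = loop_test_alt n
instance (n : Int) (out : Int) : Decidable (Spec_loop_test n out) := by unfold Spec_loop_test; infer_instance

-- ===== CLAIM (what is proved, stated in full; the proofs are below) =====
def Claim_equal_loop_test : Prop := ∀ (n : Int), Dom_loop_test n → Spec_loop_test n (loop_test n)

-- ===== LEMMAS AND PROOFS =====

-- closed form for the loop, proved for every natural upper bound
theorem loop_test_closed (k : Nat) :
    (PySem.List.pyRange 0 (k : Int) 1).foldl
      (fun res i => if PySem.Int.mod i 2 = 0 then res + i else res - 1) 0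
    = PySem.Int.floordiv ((k : Int) + 1) 2 * (PySem.Int.floordiv ((k : Int) + 1) 2 - 1)
      - PySem.Int.floordiv (k : Int) 2 := by
  induction k with
  | zero => decide
  | succ k ih =>
    have h : ((k : Int) + 1) = ((k : Int)) + 1 := rfl
    rw [show ((k + 1 : Nat) : Int) = (k : Int) + 1 by push_cast; ring,
        PySem.List.pyRange_one_succ_right (by positivity), List.foldl_append, ih]
    simp only [List.foldl]
    have e1 : PySem.Int.floordiv ((k : Int) + 1) 2 = ((k + 1) / 2 : Nat) := by
      exact_mod_cast PySem.Int.floordiv_natCast (k + 1) 2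
    have e2 : PySem.Int.floordiv (k : Int) 2 = ((k / 2 : Nat) : Int) :=
      PySem.Int.floordiv_natCast k 2
    have e3 : PySem.Int.floordiv ((k : Int) + 1 + 1) 2 = ((k + 2) / 2 : Nat) := by
      exact_mod_cast PySem.Int.floordiv_natCast (k + 2) 2
    have e4 : PySem.Int.mod (k : Int) 2 = ((k % 2 : Nat) : Int) :=
      PySem.Int.mod_natCast k 2
    rcases Nat.even_or_odd k with ⟨m, hm⟩ | ⟨m, hm⟩
    · subst hm
      rw [e4, show (m + m) % 2 = 0 from by omega]
      rw [e1, e2, e3]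
      have h1 : (m + m + 1) / 2 = m := by omega
      have h2 : (m + m) / 2 = m := by omega
      have h3 : (m + m + 2) / 2 = m + 1 := by omega
      rw [h1, h2, h3]
      norm_num
      ring
    · subst hm
      rw [e4, show (2 * m + 1) % 2 = 1 from by omega]
      rw [e1, e2, e3]
      have h1 : (2 * m + 1 + 1) / 2 = m + 1 := by omega
      have h2 : (2 * m + 1) / 2 = m := by omega
      have h3 : (2 * m + 1 + 2) / 2 = m + 1 := by omega
      rw [h1, h2, h3]
      norm_num
      ring

-- ===== VERDICT (by name: the statement is the Claim_ definition above) =====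
theorem loop_test_spec : Claim_equal_loop_test := by
  intro n _
  unfold Spec_loop_test loop_test loop_test_alt
  by_cases hn : n ≤ 0
  · rw [PySem.List.pyRange_one_eq_nil hn]
    simp [hn]
  · obtain ⟨k, hk⟩ : ∃ k : Nat, n = (k : Int) := ⟨n.toNat, by omega⟩
    subst hk
    rw [loop_test_closed, if_neg hn]
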